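-- pv_equiv track=rewrite | github.com/real-darth/DD2367-project-quantum-parallellism | visualization/utils.py | extract_gate_labels
-- ===== SOURCE A (Python) =====
-- def extract_gate_labels(data):
--     """Extract gate labels from the given data. Indexes gates that appear more than once."""
--     gate_labels = []
--     gate_count = {}
--     temp_count = {}
--
--     # count the occurrences of each gate
--     for instruction in data["gates"]:
--         gate = instruction.upper()
--
--         # replace "P" with Φ
--         if gate == "CP":
--             gate = "CΦ"
--
--         if gate in gate_count:
--             gate_count[gate] += 1
--         else:
--             gate_count[gate] = 1
--
--     # create gate labels, indexing only those that appear more than once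
--     for instruction in data["gates"]:
--         gate = instruction.upper()
--
--         if gate == "CP":
--             gate = "CΦ"
--
--         # if the gate appears more than once, add an index
--         if gate_count[gate] > 1:
--             # increase a temporary count for gate label
--             if gate in temp_count:
--                 temp_count[gate] += 1
--             else:
--                 temp_count[gate] = 1
--             # index the gate label
--             gate_label = f"{gate}{temp_count[gate]}"
--         else:
--             # if the gate appears only once, use no indexing
--             gate_label = gate
--
--         gate_labels.append(gate_label)
--
--     return gate_labels
-- ===== SOURCE B (Python) =====
-- def extract_gate_labels(data):
--     """Group gate positions by normalized name, then scatter labels into a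
--     preallocated result list (indexed labels only for gates appearing more than once)."""
--     gates = []
--     for instruction in data["gates"]:
--         gate = instruction.upper()
--         if gate == "CP":
--             gate = "C\u03a6"
--         gates.append(gate)
--
--     groups = {}
--     for i, gate in enumerate(gates):
--         groups.setdefault(gate, []).append(i)
--
--     out = [""] * len(gates)
--     for gate, positions in groups.items():
--         if len(positions) == 1:
--             out[positions[0]] = gate
--         else:
--             for k, i in enumerate(positions):
--                 out[i] = f"{gate}{k + 1}"
--     return out
-- ===== Notes on version B (the rewrite author's own statement) =====
-- stated objective: alternative
-- what changed: Replaces A's two sequential passes with counting and running temp_count dicts by a group-by-position dict (gate -> list of indices) built in one pass, whose entries are then scattered into a preallocated result list by stored position.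
import Mathlib
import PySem

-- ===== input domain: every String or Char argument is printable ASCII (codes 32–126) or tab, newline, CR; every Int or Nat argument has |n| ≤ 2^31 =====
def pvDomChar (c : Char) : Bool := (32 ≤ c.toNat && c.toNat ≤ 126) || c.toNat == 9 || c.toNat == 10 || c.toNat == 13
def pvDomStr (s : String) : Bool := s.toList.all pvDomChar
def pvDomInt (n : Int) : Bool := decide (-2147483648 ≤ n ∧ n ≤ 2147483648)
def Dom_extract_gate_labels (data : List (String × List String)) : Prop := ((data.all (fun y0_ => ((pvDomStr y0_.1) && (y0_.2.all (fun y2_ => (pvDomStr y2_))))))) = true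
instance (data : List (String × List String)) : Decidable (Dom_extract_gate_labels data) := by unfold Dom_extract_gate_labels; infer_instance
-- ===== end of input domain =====

-- B groups positions by normalized gate name and scatters the labels into a preallocated
-- result list, instead of A's count-then-relabel double sequential pass over the gate list
-- (alternative decomposition, similar cost; return value only, no observable mutation).


-- ===== PORT A =====
def extract_gate_labels (data : List (String × List String)) : List String :=
  match PySem.Dict.get? (PySem.Dict.mk data) "gates" with
  | none => []   -- KeyError: excluded by Pre_
  | some gs =>
    let gate_count := gs.foldl (fun (d : PySem.Dict String Int) instruction =>
      let gate := PySem.Str.upper instruction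
      let gate := if gate == "CP" then "CΦ" else gate
      match d.get? gate with
      | some c => d.insert gate (c + 1)
      | none => d.insert gate 1) PySem.Dict.empty
    let r := gs.foldl (fun (st : PySem.Dict String Int × List String) instruction =>
      let temp_count := st.1
      let gate_labels := st.2
      let gate := PySem.Str.upper instruction
      let gate := if gate == "CP" then "CΦ" else gate
      if 1 < gate_count.getD gate 0 then
        let tc := match temp_count.get? gate with
          | some c => c + 1
          | none => 1
        (temp_count.insert gate tc, gate_labels ++ [gate ++ PySem.Int.toStr tc])
      else
        (temp_count, gate_labels ++ [gate])) (PySem.Dict.empty, [])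
    r.2

-- ===== PORT B =====
def extract_gate_labels_alt (data : List (String × List String)) : List String :=
  match PySem.Dict.get? (PySem.Dict.mk data) "gates" with
  | none => []   -- KeyError: excluded by Pre_
  | some gs =>
    let gates := gs.map (fun instruction =>
      let gate := PySem.Str.upper instruction
      if gate == "CP" then "CΦ" else gate)
    let groups := (PySem.List.enumerate gates).foldl
      (fun (d : PySem.Dict String (List Int)) p => d.modify p.2 [] (fun l => l ++ [p.1]))
      PySem.Dict.empty
    let out0 := List.replicate gates.length ""
    groups.items.foldl (fun out p =>
      if p.2.length == 1 then
        PySem.List.pySetD out (PySem.List.pyGetD p.2 0 0) p.1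
      else
        (PySem.List.enumerate p.2).foldl
          (fun out q => PySem.List.pySetD out q.2 (p.1 ++ PySem.Int.toStr (q.1 + 1))) out)
      out0

-- ===== PRECONDITION & SPEC =====
-- Pre_ excludes exactly the inputs whose association list has no "gates" key, on which the Python A raises KeyError.
def Pre_extract_gate_labels (data : List (String × List String)) : Prop :=
  "gates" ∈ data.map (·.1)
instance (data : List (String × List String)) : Decidable (Pre_extract_gate_labels data) := by unfold Pre_extract_gate_labels; infer_instance
def pvWitness_extract_gate_labels : (List (String × List String)) :=
  [("gates", ["h", "cp", "X", "h", "CP"])]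
def Spec_extract_gate_labels (data : List (String × List String)) (out : List String) : Prop := out = extract_gate_labels_alt data
instance (data : List (String × List String)) (out : List String) : Decidable (Spec_extract_gate_labels data out) := by unfold Spec_extract_gate_labels; infer_instance

-- ===== CLAIM (what is proved, stated in full; the proofs are below) =====
def Claim_equal_extract_gate_labels : Prop := ∀ (data : List (String × List String)), Dom_extract_gate_labels data → Pre_extract_gate_labels data → Spec_extract_gate_labels data (extract_gate_labels data)

-- ===== LEMMAS AND PROOFS =====

def pvNorm (s : String) : String :=
  let gate := PySem.Str.upper s
  if gate == "CP" then "CΦ" else gate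

def pvLabel (gates : List String) (j : Nat) : String :=
  let g := gates.getD j ""
  if 1 < gates.count g then g ++ PySem.Int.toStr (((gates.take j).count g : Int) + 1) else g

def pvCanon (gates : List String) : List String :=
  (List.range gates.length).map (pvLabel gates)

def pvStepCount (d : PySem.Dict String Int) (g : String) : PySem.Dict String Int :=
  match d.get? g with
  | some c => d.insert g (c + 1)
  | none => d.insert g 1

theorem pvStepCount_eq (d : PySem.Dict String Int) (g : String) :
    pvStepCount d g = d.insert g (d.getD g 0 + 1) := by
  unfold pvStepCount
  cases h : d.get? g with
  | some c => rw [PySem.Dict.getD_of_get?_eq_some d 0 h]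
  | none =>
    rw [PySem.Dict.getD_of_get?_eq_none d 0 h]
    show d.insert g 1 = d.insert g (0 + 1)
    norm_num

theorem pvCount_getD (gates : List String) (g : String) :
    (gates.foldl pvStepCount PySem.Dict.empty).getD g 0 = (gates.count g : Int) := by
  have h : pvStepCount = fun (d : PySem.Dict String Int) x => d.insert x (d.getD x 0 + 1) := by
    funext d x; exact pvStepCount_eq d x
  rw [h, PySem.Dict.getD_foldl_insert_add_one, PySem.Dict.getD_empty]
  simp

def pvStepA (total : PySem.Dict String Int) (st : PySem.Dict String Int × List String)
    (gate : String) : PySem.Dict String Int × List String :=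
  if 1 < total.getD gate 0 then
    let tc := match st.1.get? gate with
      | some c => c + 1
      | none => 1
    (st.1.insert gate tc, st.2 ++ [gate ++ PySem.Int.toStr tc])
  else
    (st.1, st.2 ++ [gate])

def pvLabelsFrom (total : PySem.Dict String Int) (pref rest : List String) : List String :=
  match rest with
  | [] => []
  | g :: r =>
    (if 1 < total.getD g 0 then g ++ PySem.Int.toStr ((pref.count g : Int) + 1) else g)
      :: pvLabelsFrom total (pref ++ [g]) r

theorem pvA_loop (total : PySem.Dict String Int) (rest : List String) :
    ∀ (pref : List String) (temp : PySem.Dict String Int) (acc : List String),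
    (∀ x, temp.getD x 0 = ((pref.filter (fun y => 1 < total.getD y 0)).count x : Int)) →
    (rest.foldl (pvStepA total) (temp, acc)).2 = acc ++ pvLabelsFrom total pref rest := by
  induction rest with
  | nil => intro pref temp acc _; simp [pvLabelsFrom]
  | cons g r ih =>
    intro pref temp acc hchar
    simp only [List.foldl_cons, pvLabelsFrom]
    by_cases hg : 1 < total.getD g 0
    · have htc : (match temp.get? g with | some c => c + 1 | none => (1 : Int)) =
          ((pref.count g : Int) + 1) := by
        cases h : temp.get? g with
        | some c =>
          have := PySem.Dict.getD_of_get?_eq_some temp 0 h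
          rw [hchar g] at this
          rw [← this, List.count_filter (by simp [hg])]
        | none =>
          have h0 := PySem.Dict.getD_of_get?_eq_none temp 0 h
          rw [hchar g] at h0
          have hz : (pref.filter (fun y => decide (1 < total.getD y 0))).count g = 0 := by
            exact_mod_cast h0
          rw [List.count_filter (by simp [hg])] at hz
          show (1 : Int) = (pref.count g : Int) + 1
          rw [hz]
          norm_num
      have hstep : pvStepA total (temp, acc) g =
          (temp.insert g ((pref.count g : Int) + 1),
           acc ++ [g ++ PySem.Int.toStr ((pref.count g : Int) + 1)]) := by
        simp only [pvStepA, if_pos hg]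
        rw [htc]
      rw [hstep, ih (pref ++ [g])]
      · simp [if_pos hg]
      · intro x
        rw [PySem.Dict.getD_insert]
        rw [List.filter_append, List.count_append]
        by_cases hx : x = g
        · subst hx
          simp [hg]
        · simp only [if_neg hx]
          rw [hchar x]
          have : List.count x (List.filter (fun y => decide (1 < total.getD y 0)) [g]) = 0 := by
            by_cases h1 : 1 < total.getD g 0 <;>
              simp [List.filter, h1, Ne.symm hx]
          simp [this]
    · have hstep : pvStepA total (temp, acc) g = (temp, acc ++ [g]) := by
        simp [pvStepA, if_neg hg]
      rw [hstep, ih (pref ++ [g])]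
      · simp [if_neg hg]
      · intro x
        rw [hchar x, List.filter_append, List.count_append]
        simp [List.filter, hg]

theorem pvLabelsFrom_eq (gates : List String) (total : PySem.Dict String Int)
    (htot : ∀ g, total.getD g 0 = (gates.count g : Int)) (rest : List String) :
    ∀ pref, gates = pref ++ rest →
    pvLabelsFrom total pref rest =
      (List.range rest.length).map (fun k => pvLabel gates (pref.length + k)) := by
  induction rest with
  | nil => intro pref _; simp [pvLabelsFrom]
  | cons g r ih =>
    intro pref hsplit
    have hget : gates.getD pref.length "" = g := by
      rw [hsplit, List.getD_eq_getElem _ _ (by simp)]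
      simp
    have htake : gates.take pref.length = pref := by
      rw [hsplit, List.take_left]
    have hcond : (1 < total.getD g 0) ↔ (1 < gates.count g) := by
      rw [htot g]; exact_mod_cast Iff.rfl
    simp only [pvLabelsFrom, List.length_cons, List.range_succ_eq_map, List.map_cons,
      List.map_map]
    have hhead : (if 1 < total.getD g 0 then g ++ PySem.Int.toStr ((pref.count g : Int) + 1) else g)
        = pvLabel gates (pref.length + 0) := by
      simp only [Nat.add_zero, pvLabel, hget, htake]
      by_cases hc : 1 < gates.count g
      · rw [if_pos (hcond.mpr hc), if_pos hc]
      · rw [if_neg (fun h => hc (hcond.mp h)), if_neg hc]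
    have htail : pvLabelsFrom total (pref ++ [g]) r =
        List.map ((fun k => pvLabel gates (pref.length + k)) ∘ Nat.succ) (List.range r.length) := by
      rw [ih (pref ++ [g]) (by simpa using hsplit)]
      apply List.map_congr_left
      intro k _
      simp only [Function.comp, List.length_append, List.length_singleton]
      congr 1
      omega
    rw [hhead, htail]

theorem pvA_main (data : List (String × List String)) (gs : List String)
    (h : PySem.Dict.get? (PySem.Dict.mk data) "gates" = some gs) :
    extract_gate_labels data = pvCanon (gs.map pvNorm) := by
  unfold extract_gate_labels
  rw [h]
  show (gs.foldl (fun st i => pvStepA (gs.foldl (fun d i => pvStepCount d (pvNorm i)) PySem.Dict.empty) st (pvNorm i)) (PySem.Dict.empty, [])).2 = _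
  rw [← List.foldl_map (f := pvNorm), ← List.foldl_map (f := pvNorm)]
  rw [pvA_loop _ _ [] _ [] (by intro x; simp [PySem.Dict.getD_empty])]
  rw [pvLabelsFrom_eq (gs.map pvNorm) _ (fun g => pvCount_getD _ g) _ [] rfl]
  simp [pvCanon]

def pvIdx (g : String) (gates : List String) : List Int :=
  ((PySem.List.enumerate gates).filter (fun p => p.2 == g)).map (fun p => p.1)

theorem pv_groups_getD (gates : List String) (g : String) :
    ((PySem.List.enumerate gates).foldl
      (fun (d : PySem.Dict String (List Int)) p => d.modify p.2 [] (fun l => l ++ [p.1]))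
      PySem.Dict.empty).getD g [] = pvIdx g gates := by
  have h : (PySem.List.enumerate gates).foldl
      (fun (d : PySem.Dict String (List Int)) p => d.modify p.2 [] (fun l => l ++ [p.1]))
      PySem.Dict.empty
      = ((PySem.List.enumerate gates).map Prod.swap).foldl
      (fun (d : PySem.Dict String (List Int)) p => d.modify p.1 [] (fun l => l ++ [p.2]))
      PySem.Dict.empty := by
    rw [List.foldl_map]
    rfl
  rw [h, PySem.Dict.getD_foldl_modify_append, PySem.Dict.getD_empty]
  rw [List.filter_map, List.map_map]
  rfl

theorem pv_groups_keys (gates : List String) :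
    ((PySem.List.enumerate gates).foldl
      (fun (d : PySem.Dict String (List Int)) p => d.modify p.2 [] (fun l => l ++ [p.1]))
      PySem.Dict.empty).keys = PySem.Set.ofList gates := by
  have h := PySem.Dict.keys_foldl_modify_key (PySem.List.enumerate gates)
    (fun (p : Int × String) => p.2) ([] : List Int)
    (fun (d : PySem.Dict String (List Int)) (p : Int × String) (l : List Int) => l ++ [p.1])
    PySem.Dict.empty
  rw [h, PySem.List.map_snd_enumerate]
  rfl

theorem pv_groups_nodup (gates : List String) :
    ((PySem.List.enumerate gates).foldl
      (fun (d : PySem.Dict String (List Int)) p => d.modify p.2 [] (fun l => l ++ [p.1]))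
      PySem.Dict.empty).keys.Nodup := by
  exact PySem.Dict.nodup_keys_foldl_modify_key _ (fun (p : Int × String) => p.2) _
    (fun d p l => l ++ [p.1]) _ (by simp [PySem.Dict.keys_empty])

theorem pvIdx_append (g : String) (l : List String) (x : String) :
    pvIdx g (l ++ [x]) = pvIdx g l ++ (if x == g then [(l.length : Int)] else []) := by
  unfold pvIdx
  rw [PySem.List.enumerate_append, List.filter_append, List.map_append]
  congr 1
  by_cases hx : x == g <;>
    simp [PySem.List.enumerate, hx]

theorem pvIdx_length (g : String) (l : List String) :
    (pvIdx g l).length = l.count g := by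
  induction l using List.reverseRecOn with
  | nil => rfl
  | append_singleton l x ih =>
    rw [pvIdx_append, List.length_append, ih, List.count_append]
    by_cases hx : x == g <;> simp [hx, List.count_singleton]

theorem pvIdx_mem (g : String) (l : List String) (i : Int) :
    i ∈ pvIdx g l ↔ ∃ j : Nat, j < l.length ∧ i = (j : Int) ∧ l.getD j "" = g := by
  unfold pvIdx
  simp only [List.mem_map, List.mem_filter, PySem.List.mem_enumerate_iff]
  constructor
  · rintro ⟨p, ⟨⟨j, hj, rfl⟩, hg⟩, rfl⟩
    exact ⟨j, hj, by simp, by rw [List.getD_eq_getElem _ _ hj]; simpa using hg⟩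
  · rintro ⟨j, hj, rfl, hg⟩
    refine ⟨((j : Int), l[j]), ⟨⟨j, hj, by simp⟩, ?_⟩, rfl⟩
    rw [List.getD_eq_getElem _ _ hj] at hg
    simpa using hg

theorem pvIdx_nodup (g : String) (l : List String) : (pvIdx g l).Nodup := by
  have hp : (pvIdx g l).Pairwise (fun a b => a < b) := by
    unfold pvIdx
    rw [List.pairwise_map]
    exact List.Pairwise.filter _ (PySem.List.pairwise_lt_enumerate l 0)
  exact hp.nodup

theorem pv_mem_enumerate_pvIdx (g : String) (gates : List String) (k i : Int) :
    (k, i) ∈ PySem.List.enumerate (pvIdx g gates) ↔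
      ∃ j : Nat, j < gates.length ∧ i = (j : Int) ∧ gates.getD j "" = g ∧
        k = ((gates.take j).count g : Int) := by
  induction gates using List.reverseRecOn with
  | nil => simp [pvIdx, PySem.List.enumerate]
  | append_singleton l x ih =>
    rw [pvIdx_append, PySem.List.enumerate_append, List.mem_append, ih, pvIdx_length]
    constructor
    · rintro (⟨j, hj, rfl, hg, rfl⟩ | hnew)
      · refine ⟨j, by simp; omega, rfl, ?_, ?_⟩
        · rw [List.getD_append _ _ _ _ hj, hg]
        · rw [List.take_append_of_le_length (le_of_lt hj)]
      · by_cases hx : x == g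
        · rw [if_pos hx, PySem.List.enumerate_cons, PySem.List.enumerate_nil] at hnew
          simp only [List.mem_singleton, Prod.mk.injEq] at hnew
          obtain ⟨hk, hi⟩ := hnew
          refine ⟨l.length, by simp, by rw [hi], ?_, ?_⟩
          · rw [List.getD_append_right _ _ _ _ (le_refl _)]
            simpa using hx
          · rw [List.take_append_of_le_length (le_refl _), List.take_length]
            omega
        · rw [if_neg hx, PySem.List.enumerate_nil] at hnew
          exact absurd hnew (List.not_mem_nil)
    · rintro ⟨j, hj, rfl, hg, rfl⟩
      rw [List.length_append, List.length_singleton] at hj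
      by_cases hjl : j < l.length
      · left
        exact ⟨j, hjl, rfl, by rw [← List.getD_append _ _ _ _ hjl]; exact hg,
          by rw [List.take_append_of_le_length (le_of_lt hjl)]⟩
      · right
        have hje : j = l.length := by omega
        subst hje
        have hxg : x = g := by
          rw [List.getD_append_right _ _ _ _ (le_refl _)] at hg
          simpa using hg
        rw [if_pos (by simp [hxg]), PySem.List.enumerate_cons, PySem.List.enumerate_nil]
        rw [List.take_append_of_le_length (le_refl _), List.take_length]
        simp

theorem pv_find_enumerate (l : List Int) :
    ∀ (s k i : Int), l.Nodup → (k, i) ∈ PySem.List.enumerate l s →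
    (PySem.List.enumerate l s).find? (fun q => q.2 == i) = some (k, i) := by
  induction l with
  | nil => intro s k i _ h; simp [PySem.List.enumerate_nil] at h
  | cons x xs ih =>
    intro s k i hnd hmem
    rw [PySem.List.enumerate_cons] at hmem ⊢
    rcases List.mem_cons.mp hmem with heq | htail
    · cases heq
      rw [List.find?_cons_of_pos (by simp)]
    · have hix : i ∈ xs := by
        have h2 : i ∈ (PySem.List.enumerate xs (s+1)).map (fun q => q.2) :=
          List.mem_map.mpr ⟨(k, i), htail, rfl⟩
        rwa [PySem.List.map_snd_enumerate] at h2
      have hxne : x ≠ i := fun h => (List.nodup_cons.mp hnd).1 (h ▸ hix)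
      rw [List.find?_cons_of_neg (by simpa using hxne)]
      exact ih (s+1) k i (List.nodup_cons.mp hnd).2 htail

theorem pv_pySetD_eq (xs : List String) (i : Int) (v : String)
    (h0 : 0 ≤ i) (h : i.toNat < xs.length) :
    PySem.List.pySetD xs i v = xs.set i.toNat v := by
  have hi : i = ((i.toNat : Nat) : Int) := (Int.toNat_of_nonneg h0).symm
  rw [hi]
  unfold PySem.List.pySetD
  rw [PySem.List.pySet?_natCast _ _ _ (by simpa using h)]
  rfl

theorem pvScatter (lab : Int → String) (l : List Int) :
    ∀ (s : Int) (out : List String), l.Nodup →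
    (∀ i ∈ l, 0 ≤ i ∧ i.toNat < out.length) →
    ((PySem.List.enumerate l s).foldl (fun o q => PySem.List.pySetD o q.2 (lab q.1)) out).length
      = out.length ∧
    ∀ j : Nat, j < out.length →
      ((PySem.List.enumerate l s).foldl (fun o q => PySem.List.pySetD o q.2 (lab q.1)) out).getD j ""
        = match (PySem.List.enumerate l s).find? (fun q => q.2 == (j : Int)) with
          | some q => lab q.1
          | none => out.getD j "" := by
  induction l with
  | nil => intro s out _ _; simp [PySem.List.enumerate_nil]
  | cons x xs ih =>
    intro s out hnd hb
    have hx0 : 0 ≤ x := (hb x (by simp)).1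
    have hxl : x.toNat < out.length := (hb x (by simp)).2
    rw [PySem.List.enumerate_cons]
    simp only [List.foldl_cons]
    rw [pv_pySetD_eq out x (lab s) hx0 hxl]
    have hb' : ∀ i ∈ xs, 0 ≤ i ∧ i.toNat < (out.set x.toNat (lab s)).length := by
      intro i hi; rw [List.length_set]; exact hb i (by simp [hi])
    obtain ⟨ihlen, ihval⟩ := ih (s + 1) (out.set x.toNat (lab s)) (List.nodup_cons.mp hnd).2 hb'
    refine ⟨by rw [ihlen, List.length_set], ?_⟩
    intro j hj
    have hj' : j < (out.set x.toNat (lab s)).length := by rw [List.length_set]; exact hj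
    by_cases hxj : x = (j : Int)
    · rw [List.find?_cons_of_pos (by simpa using hxj)]
      have hnotin : ((j : Int)) ∉ xs := hxj ▸ (List.nodup_cons.mp hnd).1
      have hnone : (PySem.List.enumerate xs (s + 1)).find? (fun q => q.2 == (j : Int)) = none := by
        rw [List.find?_eq_none]
        intro q hq hq2
        apply hnotin
        have : q.2 ∈ (PySem.List.enumerate xs (s + 1)).map (fun q => q.2) :=
          List.mem_map.mpr ⟨q, hq, rfl⟩
        rw [PySem.List.map_snd_enumerate] at this
        simpa using (eq_of_beq hq2) ▸ this
      rw [ihval j hj', hnone]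
      have hxt : x.toNat = j := by omega
      rw [List.getD_eq_getElem _ _ hj', List.getElem_set]
      simp [hxt]
    · rw [List.find?_cons_of_neg (by simpa using hxj)]
      rw [ihval j hj']
      have hxt : x.toNat ≠ j := by omega
      cases hfind : (PySem.List.enumerate xs (s + 1)).find? (fun q => q.2 == (j : Int)) with
      | some q => rfl
      | none =>
        rw [List.getD_eq_getElem _ _ hj', List.getElem_set, if_neg hxt,
          List.getD_eq_getElem _ _ hj]

def pvStepB (out : List String) (p : String × List Int) : List String :=
  if p.2.length == 1 then
    PySem.List.pySetD out (PySem.List.pyGetD p.2 0 0) p.1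
  else
    (PySem.List.enumerate p.2).foldl
      (fun out q => PySem.List.pySetD out q.2 (p.1 ++ PySem.Int.toStr (q.1 + 1))) out

theorem pvEntry (gates : List String) (g : String) (out : List String)
    (hlen : out.length = gates.length) :
    (pvStepB out (g, pvIdx g gates)).length = gates.length ∧
    ∀ j : Nat, j < gates.length →
      (pvStepB out (g, pvIdx g gates)).getD j "" =
        if gates.getD j "" = g then pvLabel gates j else out.getD j "" := by
  by_cases h1 : (pvIdx g gates).length = 1
  · obtain ⟨i0, hi0⟩ := List.length_eq_one_iff.mp h1
    obtain ⟨j0, hj0, hij0, hg0⟩ := (pvIdx_mem g gates i0).mp (hi0 ▸ List.mem_singleton_self i0)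
    have hstep : pvStepB out (g, pvIdx g gates) = out.set j0 g := by
      unfold pvStepB
      rw [if_pos (by simp [h1]), hi0]
      have : PySem.List.pyGetD [i0] 0 0 = i0 := by
        simp [PySem.List.pyGetD, PySem.List.pyGet?, PySem.List.pyIdx?]
      rw [this, pv_pySetD_eq out i0 g (by omega) (by omega)]
      congr 1
      omega
    have hcount : gates.count g = 1 := by rw [← pvIdx_length, h1]
    refine ⟨by rw [hstep, List.length_set, hlen], ?_⟩
    intro j hj
    have hj' : j < out.length := by omega
    rw [hstep, List.getD_eq_getElem _ _ (by rw [List.length_set]; omega), List.getElem_set]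
    by_cases hjj : j0 = j
    · subst hjj
      rw [if_pos rfl, if_pos hg0]
      unfold pvLabel
      simp only [hg0]
      rw [if_neg (by omega)]
    · rw [if_neg hjj]
      have hc : ¬ gates.getD j "" = g := by
        intro hc
        have : (j : Int) ∈ pvIdx g gates := (pvIdx_mem g gates _).mpr ⟨j, hj, rfl, hc⟩
        rw [hi0] at this
        have : (j : Int) = i0 := by simpa using this
        omega
      rw [if_neg hc, List.getD_eq_getElem _ _ hj']
  · have hstep : pvStepB out (g, pvIdx g gates) =
        (PySem.List.enumerate (pvIdx g gates)).foldl
          (fun out q => PySem.List.pySetD out q.2 (g ++ PySem.Int.toStr (q.1 + 1))) out := by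
      unfold pvStepB
      rw [if_neg (by simpa using h1)]
    have hb : ∀ i ∈ pvIdx g gates, 0 ≤ i ∧ i.toNat < out.length := by
      intro i hi
      obtain ⟨j, hj, rfl, _⟩ := (pvIdx_mem g gates i).mp hi
      constructor <;> omega
    obtain ⟨hsl, hsv⟩ := pvScatter (fun k => g ++ PySem.Int.toStr (k + 1))
      (pvIdx g gates) 0 out (pvIdx_nodup g gates) hb
    rw [hstep]
    refine ⟨by rw [hsl, hlen], ?_⟩
    intro j hj
    rw [hsv j (by omega)]
    by_cases hc : gates.getD j "" = g
    · have hmem : ((((gates.take j).count g : Nat) : Int), (j : Int)) ∈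
          PySem.List.enumerate (pvIdx g gates) :=
        (pv_mem_enumerate_pvIdx g gates _ _).mpr ⟨j, hj, rfl, hc, rfl⟩
      rw [pv_find_enumerate _ 0 _ _ (pvIdx_nodup g gates) hmem]
      have hcnt : 1 < gates.count g := by
        have hpos : 0 < (pvIdx g gates).length :=
          List.length_pos_of_mem ((pvIdx_mem g gates _).mpr ⟨j, hj, rfl, hc⟩)
        rw [pvIdx_length] at hpos h1
        omega
      rw [if_pos hc]
      unfold pvLabel
      simp only [hc]
      rw [if_pos hcnt]
    · have hnone : (PySem.List.enumerate (pvIdx g gates)).find?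
          (fun q => q.2 == (j : Int)) = none := by
        rw [List.find?_eq_none]
        rintro ⟨qk, qi⟩ hq hq2
        obtain ⟨j', _, hji, hg', _⟩ := (pv_mem_enumerate_pvIdx g gates qk qi).mp hq
        have : qi = (j : Int) := by simpa using hq2
        have : j' = j := by omega
        exact hc (this ▸ hg')
      rw [hnone, if_neg hc]

theorem pvOuter (gates : List String) (ks : List String) :
    ∀ (out : List String), out.length = gates.length →
    ((ks.map (fun g => (g, pvIdx g gates))).foldl pvStepB out).length = gates.length ∧
    ∀ j : Nat, j < gates.length →
      ((ks.map (fun g => (g, pvIdx g gates))).foldl pvStepB out).getD j "" =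
        if gates.getD j "" ∈ ks then pvLabel gates j else out.getD j "" := by
  induction ks with
  | nil => intro out hlen; simp [hlen]
  | cons g ks' ih =>
    intro out hlen
    simp only [List.map_cons, List.foldl_cons]
    obtain ⟨helen, heval⟩ := pvEntry gates g out hlen
    obtain ⟨ihlen, ihval⟩ := ih (pvStepB out (g, pvIdx g gates)) helen
    refine ⟨ihlen, ?_⟩
    intro j hj
    rw [ihval j hj]
    by_cases hk : gates.getD j "" ∈ ks'
    · rw [if_pos hk, if_pos (List.mem_cons.mpr (Or.inr hk))]
    · rw [if_neg hk, heval j hj]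
      by_cases hcg : gates.getD j "" = g
      · rw [if_pos hcg, if_pos (List.mem_cons.mpr (Or.inl hcg))]
      · rw [if_neg hcg, if_neg (by simp only [List.mem_cons, not_or]; exact ⟨hcg, hk⟩)]

theorem pvB_main (data : List (String × List String)) (gs : List String)
    (h : PySem.Dict.get? (PySem.Dict.mk data) "gates" = some gs) :
    extract_gate_labels_alt data = pvCanon (gs.map pvNorm) := by
  unfold extract_gate_labels_alt
  rw [h]
  show (((PySem.List.enumerate (gs.map pvNorm)).foldl
      (fun (d : PySem.Dict String (List Int)) p => d.modify p.2 [] (fun l => l ++ [p.1]))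
      PySem.Dict.empty).items.foldl pvStepB
      (List.replicate (gs.map pvNorm).length "")) = _
  set gates := gs.map pvNorm with hgates
  rw [PySem.Dict.items_eq_map_keys _ (pv_groups_nodup gates) []]
  rw [pv_groups_keys gates]
  have hfun : (fun k => (k, ((PySem.List.enumerate gates).foldl
      (fun (d : PySem.Dict String (List Int)) p => d.modify p.2 [] (fun l => l ++ [p.1]))
      PySem.Dict.empty).getD k [])) = fun k => (k, pvIdx k gates) := by
    funext k
    rw [pv_groups_getD]
  rw [hfun]
  obtain ⟨hlen, hval⟩ := pvOuter gates (PySem.Set.ofList gates)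
    (List.replicate gates.length "") (by rw [List.length_replicate])
  apply List.ext_getElem
  · rw [hlen]
    simp [pvCanon]
  · intro j hj1 hj2
    have hj : j < gates.length := by rwa [hlen] at hj1
    rw [← List.getD_eq_getElem _ "" hj1, hval j hj]
    have hmem : gates.getD j "" ∈ PySem.Set.ofList gates := by
      rw [PySem.Set.mem_ofList, List.getD_eq_getElem _ _ hj]
      exact List.getElem_mem hj
    rw [if_pos hmem]
    simp [pvCanon]

-- ===== VERDICT (by name: the statement is the Claim_ definition above) =====
theorem extract_gate_labels_spec : Claim_equal_extract_gate_labels := by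
  intro data _ hpre
  unfold Spec_extract_gate_labels
  obtain ⟨gs, hgs⟩ : ∃ gs, PySem.Dict.get? (PySem.Dict.mk data) "gates" = some gs := by
    cases h : PySem.Dict.get? (PySem.Dict.mk data) "gates" with
    | some gs => exact ⟨gs, rfl⟩
    | none =>
      exfalso
      have hnm := (PySem.Dict.get?_eq_none_iff_not_mem_keys _ _).mp h
      rw [PySem.Dict.keys_mk] at hnm
      exact hnm hpre
  rw [pvA_main data gs hgs, pvB_main data gs hgs]
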